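-- pv_equiv track=rewrite | github.com/JMespoir/2022_02_Python | Chapter_3/DecomFactorial.py | solve
-- ===== SOURCE A (Python) =====
-- def solve(n,f,c):
--     if(c<0):
--         return "NO"
--     elif(n- f[c]==0):
--         return "YES"
--     elif(n-f[c]>0):
--         return solve(n-f[c],f,c-1)
--     elif(n-f[c]<0):
--         return solve(n,f,c-1)
-- ===== SOURCE B (Python) =====
-- def solve(n, f, c):
--     for i in range(c, -1, -1):
--         v = f[i]
--         if n == v:
--             return "YES"
--         if n > v:
--             n -= v
--     return "NO"
-- ===== Notes on version B (the rewrite author's own statement) =====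
-- stated objective: idiomatic
-- what changed: Replaced the tail recursion by a single iterative for-loop over range(c, -1, -1) that mutates n, keeping the same greedy largest-to-smallest scan.
import Mathlib
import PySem

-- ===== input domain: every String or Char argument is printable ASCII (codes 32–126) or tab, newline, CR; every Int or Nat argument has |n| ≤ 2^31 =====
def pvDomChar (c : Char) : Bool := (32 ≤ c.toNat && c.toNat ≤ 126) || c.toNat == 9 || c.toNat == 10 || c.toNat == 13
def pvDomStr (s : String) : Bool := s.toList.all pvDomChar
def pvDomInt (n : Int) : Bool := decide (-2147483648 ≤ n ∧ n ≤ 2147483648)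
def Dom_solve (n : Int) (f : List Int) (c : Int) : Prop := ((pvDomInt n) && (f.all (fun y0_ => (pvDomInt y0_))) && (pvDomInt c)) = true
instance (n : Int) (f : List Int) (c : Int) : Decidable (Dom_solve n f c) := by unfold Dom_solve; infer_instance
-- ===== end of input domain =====

-- B replaces A's tail recursion by one iterative for-loop over range(c,-1,-1); same greedy scan, same return value.

-- ===== PORT A =====
-- A's recursion on c; f[c] raises IndexError when c ≥ len(f) (excluded by Pre_; its
-- arm here returns "NO" but is never reached inside Pre_).
def solve (n : Int) (f : List Int) (c : Int) : String :=
  if c < 0 then "NO"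
  else
    match PySem.List.pyGet? f c with
    | none => "NO"
    | some v =>
      if n - v == 0 then "YES"
      else if n - v > 0 then solve (n - v) f (c - 1)
      else solve n f (c - 1)
termination_by (c + 1).toNat
decreasing_by all_goals omega

-- ===== PORT B =====
-- the for-loop of Source B: structural recursion over the index list range(c, -1, -1)
def solveLoop (f : List Int) : Int → List Int → String
  | _, [] => "NO"
  | n, i :: rest =>
    match PySem.List.pyGet? f i with
    | none => "NO"     -- f[i] IndexError; unreachable inside Pre_
    | some v =>
      if n == v then "YES"
      else if n > v then solveLoop f (n - v) rest
      else solveLoop f n rest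

def solve_alt (n : Int) (f : List Int) (c : Int) : String :=
  solveLoop f n (PySem.List.pyRange c (-1) (-1))

-- ===== PRECONDITION & SPEC =====
-- Pre_ excludes c ≥ len(f), on which Python A raises IndexError at f[c].
def Pre_solve (n : Int) (f : List Int) (c : Int) : Prop := c < (f.length : Int)
instance (n : Int) (f : List Int) (c : Int) : Decidable (Pre_solve n f c) := by unfold Pre_solve; infer_instance
def pvWitness_solve : Int × List Int × Int := (7, [1, 2, 6, 24], 3)

def Spec_solve (n : Int) (f : List Int) (c : Int) (out : String) : Prop := out = solve_alt n f c
instance (n : Int) (f : List Int) (c : Int) (out : String) : Decidable (Spec_solve n f c out) := by unfold Spec_solve; infer_instance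

-- ===== CLAIM (what is proved, stated in full; the proofs are below) =====
def Claim_equal_solve : Prop := ∀ (n : Int) (f : List Int) (c : Int), Dom_solve n f c → Pre_solve n f c → Spec_solve n f c (solve n f c)

-- ===== LEMMAS AND PROOFS =====

theorem solve_eq_loop (f : List Int) (k : Nat) :
    ∀ (n c : Int), c < (f.length : Int) → (c + 1).toNat = k →
      solve n f c = solveLoop f n (PySem.List.pyRange c (-1) (-1)) := by
  induction k with
  | zero =>
    intro n c _ hk
    have hc : c < 0 := by omega
    rw [solve, if_pos hc, PySem.List.pyRange_neg_one_eq_nil (by omega)]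
    rfl
  | succ k ih =>
    intro n c hlt hk
    have hc : 0 ≤ c := by omega
    obtain ⟨v, hget⟩ : ∃ v, PySem.List.pyGet? f c = some v :=
      ⟨_, PySem.List.pyGet?_eq_some_getElem (xs := f) (i := c) hc (by exact_mod_cast hlt)⟩
    rw [PySem.List.pyRange_neg_one_cons (by omega : (-1 : Int) < c)]
    rw [solve, if_neg (by omega)]
    rw [hget]
    simp only [solveLoop, hget]
    by_cases h1 : n - v = 0
    · simp [show (n - v == 0) = true from by simp [h1],
            show (n == v) = true from by simp; omega]
    · by_cases h2 : n - v > 0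
      · simp only [show (n - v == 0) = false from by simp; omega,
          show (n == v) = false from by simp; omega,
          if_pos h2, if_pos (show v < n by omega), Bool.false_eq_true, if_false]
        exact ih (n - v) (c - 1) (by omega) (by omega)
      · simp only [show (n - v == 0) = false from by simp; omega,
          show (n == v) = false from by simp; omega,
          if_neg h2, if_neg (show ¬ v < n by omega), Bool.false_eq_true, if_false]
        exact ih n (c - 1) (by omega) (by omega)

-- ===== VERDICT (by name: the statement is the Claim_ definition above) =====
theorem solve_spec : Claim_equal_solve := by
  intro n f c _ hpre
  exact solve_eq_loop f ((c + 1).toNat) n c hpre rfl
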